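-- pv_equiv track=rewrite | github.com/albertstarfield/alpaca-electron-zephyrine-ggmlv2v3-universal | systemCore/engineMain/Library/boost_1_86_0/libs/pfr/misc/generate_cpp17.py | fold_workaround_cast
-- ===== SOURCE A (Python) =====
-- WORKAROUND_CAST_EXPRESSIONS_LIMIT_PER_LINE = 3
--
-- def fold_workaround_cast(indexes, divider):
--     WORKAROUND_CAST_TEMPLATE = """
-- detail::workaround_cast<T, decltype({arg})>({arg})
-- """
--     lines = []
--     div = ''
--     tokens = [x.strip() for x in indexes.split(',')]
--     casts = [WORKAROUND_CAST_TEMPLATE.strip().format(arg=tok)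
--              for tok in tokens]
--     for i in range(0, len(casts)):
--         if i%WORKAROUND_CAST_EXPRESSIONS_LIMIT_PER_LINE==0:
--             div = ''
--             lines.append('')
--         lines[-1] += div + casts[i]
--         div = ','
--     return divider.join(lines)
-- ===== SOURCE B (Python) =====
-- WORKAROUND_CAST_EXPRESSIONS_LIMIT_PER_LINE = 3
--
-- def fold_workaround_cast(indexes, divider):
--     casts = ['detail::workaround_cast<T, decltype(' + tok + ')>(' + tok + ')'
--              for tok in (x.strip() for x in indexes.split(','))]
--     lines = []
--     while casts:
--         lines.append(','.join(casts[:WORKAROUND_CAST_EXPRESSIONS_LIMIT_PER_LINE]))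
--         casts = casts[WORKAROUND_CAST_EXPRESSIONS_LIMIT_PER_LINE:]
--     return divider.join(lines)
-- ===== Notes on version B (the rewrite author's own statement) =====
-- stated objective: simpler
-- what changed: Replaces A's index loop with its modulo test, running separator accumulator and in-place mutation of the last line by repeatedly slicing a 3-cast chunk off the cast list and joining it with ','.
import Mathlib
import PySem

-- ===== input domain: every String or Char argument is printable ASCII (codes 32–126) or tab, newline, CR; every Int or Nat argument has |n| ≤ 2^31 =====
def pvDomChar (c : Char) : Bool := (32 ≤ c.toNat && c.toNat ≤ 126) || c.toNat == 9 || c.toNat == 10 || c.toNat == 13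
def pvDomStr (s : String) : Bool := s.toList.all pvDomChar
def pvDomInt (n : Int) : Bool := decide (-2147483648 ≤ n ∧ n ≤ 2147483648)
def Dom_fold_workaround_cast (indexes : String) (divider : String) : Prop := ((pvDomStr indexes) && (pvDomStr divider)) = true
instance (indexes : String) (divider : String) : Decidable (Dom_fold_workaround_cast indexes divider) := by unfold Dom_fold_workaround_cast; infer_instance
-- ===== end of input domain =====

-- B replaces A's modulo-driven accumulator loop (running separator + mutation of the last
-- line) by repeatedly slicing off a 3-cast chunk and joining it; objective: simpler.

-- helper shared by both ports: A's WORKAROUND_CAST_TEMPLATE.strip().format(arg=tok) and B's string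
-- concatenation build the identical cast string (the template's only brace field is {arg}, twice)
def fwcCast (tok : List Char) : List Char :=
  "detail::workaround_cast<T, decltype(".toList ++ tok ++ ")>(".toList ++ tok ++ ")".toList

-- ===== PORT A =====
def fold_workaround_cast (indexes : String) (divider : String) : String :=
  let tokens := (PySem.Chars.splitOn indexes.toList ",".toList).map PySem.Chars.strip
  let casts := tokens.map fwcCast
  let st := (PySem.List.pyRange 0 (casts.length : Int) 1).foldl
    (fun (st : List (List Char) × List Char) i =>
      let st := if PySem.Int.mod i 3 = 0 then (st.1 ++ [([] : List Char)], ([] : List Char)) else st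
      -- lines[-1] += div + casts[i]; lines is non-empty whenever this runs
      (st.1.dropLast ++ [st.1.getLastD [] ++ st.2 ++ PySem.List.pyGetD casts i []], ",".toList))
    ([], [])
  String.ofList (PySem.Chars.join divider.toList st.1)

-- ===== PORT B =====
-- the 'while casts:' loop of Source B: slice off casts[:3], recurse on casts[3:]
def fwcChunks (casts : List (List Char)) : List (List Char) :=
  if hnil : casts = [] then []
  else PySem.Chars.join ",".toList (PySem.List.slice casts none (some 3)) ::
       fwcChunks (PySem.List.slice casts (some 3) none)
termination_by casts.length
decreasing_by
  rw [PySem.List.slice_from _ (by norm_num)]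
  have : casts.length ≠ 0 := fun hl => hnil (List.eq_nil_of_length_eq_zero hl)
  simp only [List.length_drop]
  omega

def fold_workaround_cast_alt (indexes : String) (divider : String) : String :=
  let casts := (PySem.Chars.splitOn indexes.toList ",".toList).map
    (fun x => fwcCast (PySem.Chars.strip x))
  String.ofList (PySem.Chars.join divider.toList (fwcChunks casts))

-- ===== PRECONDITION & SPEC =====
def Spec_fold_workaround_cast (indexes : String) (divider : String) (out : String) : Prop := out = fold_workaround_cast_alt indexes divider
instance (indexes : String) (divider : String) (out : String) : Decidable (Spec_fold_workaround_cast indexes divider out) := by unfold Spec_fold_workaround_cast; infer_instance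

-- ===== CLAIM (what is proved, stated in full; the proofs are below) =====
def Claim_equal_fold_workaround_cast : Prop := ∀ (indexes : String) (divider : String), Dom_fold_workaround_cast indexes divider → Spec_fold_workaround_cast indexes divider (fold_workaround_cast indexes divider)

-- ===== LEMMAS AND PROOFS =====

-- unfolding equation for fwcChunks with the slices computed away
lemma fwcChunks_eq (cs : List (List Char)) :
    fwcChunks cs = if cs = [] then [] else
      PySem.Chars.join ",".toList (cs.take 3) :: fwcChunks (cs.drop 3) := by
  rw [fwcChunks]
  split_ifs with h
  · rfl
  · rw [PySem.List.slice_from _ (by norm_num)]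
    rw [show PySem.List.slice cs none (some 3) = cs.take 3 from
      PySem.List.slice_to_natCast cs 3]
    rfl

lemma fwcChunks_ne_nil {cs : List (List Char)} (h : cs ≠ []) : fwcChunks cs ≠ [] := by
  rw [fwcChunks_eq]
  simp [h]

lemma fwcChunks_append_mod0 (x : List Char) :
    ∀ cs : List (List Char), cs.length % 3 = 0 →
      fwcChunks (cs ++ [x]) = fwcChunks cs ++ [x]
  | [], _ => by
      simp [fwcChunks_eq, PySem.Chars.join_singleton]
  | [a], h => by simp at h
  | [a, b], h => by simp at h
  | (a :: b :: c :: r), h => by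
      have hr : r.length % 3 = 0 := by simp at h; omega
      have ih := fwcChunks_append_mod0 x r hr
      rw [show (a :: b :: c :: r) ++ [x] = a :: b :: c :: (r ++ [x]) by simp]
      rw [fwcChunks_eq (a :: b :: c :: (r ++ [x])), fwcChunks_eq (a :: b :: c :: r)]
      simp [ih]
termination_by cs => cs.length

lemma fwcChunks_append_mod_ne (x : List Char) :
    ∀ cs : List (List Char), cs.length % 3 ≠ 0 →
      fwcChunks (cs ++ [x]) =
        (fwcChunks cs).dropLast ++ [(fwcChunks cs).getLastD [] ++ ",".toList ++ x]
  | [], h => by simp at h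
  | [a], _ => by
      simp [fwcChunks_eq, PySem.Chars.join_singleton, PySem.Chars.join_cons_cons]
  | [a, b], _ => by
      simp [fwcChunks_eq, PySem.Chars.join_singleton, PySem.Chars.join_cons_cons]
  | (a :: b :: c :: r), h => by
      have hr : r.length % 3 ≠ 0 := by simp at h; omega
      have hrne : r ≠ [] := by intro he; subst he; simp at hr
      have ih := fwcChunks_append_mod_ne x r hr
      have hcne := fwcChunks_ne_nil hrne
      rw [show (a :: b :: c :: r) ++ [x] = a :: b :: c :: (r ++ [x]) by simp]
      rw [fwcChunks_eq (a :: b :: c :: (r ++ [x])), fwcChunks_eq (a :: b :: c :: r)]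
      cases hl : fwcChunks r with
      | nil => exact absurd hl hcne
      | cons y ys => simp [ih, hl]
termination_by cs => cs.length

-- the A-side loop, on any fixed cast list, produces exactly B's chunks
lemma fwc_loop_eq (cs : List (List Char)) :
    (PySem.List.pyRange 0 (cs.length : Int) 1).foldl
      (fun (st : List (List Char) × List Char) i =>
        let st := if PySem.Int.mod i 3 = 0 then (st.1 ++ [([] : List Char)], ([] : List Char)) else st
        (st.1.dropLast ++ [st.1.getLastD [] ++ st.2 ++ PySem.List.pyGetD cs i []], ",".toList))
      ([], [])
    = (fwcChunks cs, if cs = [] then [] else ",".toList) := by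
  induction cs using List.reverseRecOn with
  | nil => simp [PySem.List.pyRange, fwcChunks_eq]
  | append_singleton l x ih =>
    have h0 : (0 : Int) ≤ (l.length : Int) := Int.natCast_nonneg _
    rw [show (((l ++ [x]).length : Nat) : Int) = (l.length : Int) + 1 by
      push_cast [List.length_append, List.length_cons, List.length_nil]; ring]
    rw [PySem.List.pyRange_one_succ_right h0, List.foldl_append]
    rw [PySem.List.foldl_congr_mem (PySem.List.pyRange 0 (l.length : Int) 1) _
      (fun (st : List (List Char) × List Char) i =>
        let st := if PySem.Int.mod i 3 = 0 then (st.1 ++ [([] : List Char)], ([] : List Char)) else st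
        (st.1.dropLast ++ [st.1.getLastD [] ++ st.2 ++ PySem.List.pyGetD l i []], ",".toList)) _
      (by
        intro acc i hi
        have hi' := (PySem.List.mem_pyRange_one).mp hi
        have hget : PySem.List.pyGetD (l ++ [x]) i [] = PySem.List.pyGetD l i [] := by
          rw [PySem.List.pyGetD_of_nonneg _ _ hi'.1, PySem.List.pyGetD_of_nonneg _ _ hi'.1]
          have hlt : i.toNat < l.length := by omega
          simp [List.getD_eq_getElem?_getD, List.getElem?_append_left hlt]
        simp only [hget])]
    rw [ih]
    simp only [List.foldl_cons, List.foldl_nil]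
    have hx : PySem.List.pyGetD (l ++ [x]) (l.length : Int) [] = x := by
      rw [PySem.List.pyGetD_natCast]
      simp [List.getD_eq_getElem?_getD]
    by_cases h3 : l.length % 3 = 0
    · have hmod : PySem.Int.mod (l.length : Int) 3 = 0 := by
        rw [PySem.Int.mod_eq_emod_of_pos (by norm_num)]; omega
      have hdvd : (3 : Int) ∣ (l.length : Int) := by omega
      rw [fwcChunks_append_mod0 x l h3]
      simp [hdvd, hx]
    · have hmod : ¬ PySem.Int.mod (l.length : Int) 3 = 0 := by
        rw [PySem.Int.mod_eq_emod_of_pos (by norm_num)]; omega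
      have hlne : l ≠ [] := by
        intro he; subst he; simp at h3
      have hndvd : ¬ (3 : Int) ∣ (l.length : Int) := by omega
      rw [fwcChunks_append_mod_ne x l h3]
      simp [hndvd, hx, hlne, List.append_assoc]

-- ===== VERDICT (by name: the statement is the Claim_ definition above) =====
theorem fold_workaround_cast_spec : Claim_equal_fold_workaround_cast := by
  intro indexes divider _
  unfold Spec_fold_workaround_cast fold_workaround_cast fold_workaround_cast_alt
  simp only [List.map_map]
  rw [fwc_loop_eq]
  rfl
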